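-- pv_equiv track=rewrite | github.com/rsirefelt/advent_of_code | 2020/dec22/jesper_ericsson/prob1.py | calculate_winner_score
-- ===== SOURCE A (Python) =====
-- def calculate_winner_score(deck1, deck2):
--     if len(deck1) >  len(deck2):
--         winner = deck1
--     else:
--         winner = deck2
--
--     num_cards = len(winner)
--     sum_cards = 0
--     for ind in range(num_cards):
--         sum_cards += winner[ind] * (num_cards - ind)
--
--     return sum_cards
-- ===== SOURCE B (Python) =====
-- def calculate_winner_score(deck1, deck2):
--     if len(deck1) > len(deck2):
--         winner = deck1
--     else:
--         winner = deck2
--     running = 0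
--     acc = 0
--     for card in winner:
--         running += card
--         acc += running
--     return acc
-- ===== Notes on version B (the rewrite author's own statement) =====
-- stated objective: alternative
-- what changed: Replaces the index-weighted sum (each card times n-ind, needing len and indexing) by a single value-only pass accumulating prefix sums: running += card; acc += running; the sum of all prefix sums equals the weighted sum.
import Mathlib
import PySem

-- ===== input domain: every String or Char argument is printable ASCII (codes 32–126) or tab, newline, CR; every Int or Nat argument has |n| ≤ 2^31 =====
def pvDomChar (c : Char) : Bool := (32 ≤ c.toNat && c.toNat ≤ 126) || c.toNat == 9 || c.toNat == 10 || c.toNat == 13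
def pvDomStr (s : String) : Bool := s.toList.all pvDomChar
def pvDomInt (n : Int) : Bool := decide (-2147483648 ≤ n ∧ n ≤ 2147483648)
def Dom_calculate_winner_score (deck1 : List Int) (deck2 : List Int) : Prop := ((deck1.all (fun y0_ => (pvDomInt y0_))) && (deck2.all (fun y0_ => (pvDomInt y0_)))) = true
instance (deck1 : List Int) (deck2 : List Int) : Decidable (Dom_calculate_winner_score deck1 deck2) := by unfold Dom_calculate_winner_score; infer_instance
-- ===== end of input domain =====

-- ===== PORT A =====
-- Port of A: pick winner (ties to deck2), then fold over range(num_cards) adding winner[ind]*(num_cards-ind).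
def calculate_winner_score (deck1 : List Int) (deck2 : List Int) : Int :=
  let winner := if deck1.length > deck2.length then deck1 else deck2
  let num_cards : Int := (winner.length : Int)
  (PySem.List.pyRange 0 num_cards 1).foldl
    (fun sum_cards ind => sum_cards + PySem.List.pyGetD winner ind 0 * (num_cards - ind)) 0

-- ===== PORT B =====
-- B: one value-only pass; acc accumulates the running prefix sums.
def calculate_winner_score_alt (deck1 : List Int) (deck2 : List Int) : Int :=
  let winner := if deck1.length > deck2.length then deck1 else deck2
  (winner.foldl (fun (p : Int × Int) card => (p.1 + card, p.2 + (p.1 + card))) (0, 0)).2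

-- ===== PRECONDITION & SPEC =====
def Spec_calculate_winner_score (deck1 : List Int) (deck2 : List Int) (out : Int) : Prop := out = calculate_winner_score_alt deck1 deck2
instance (deck1 : List Int) (deck2 : List Int) (out : Int) : Decidable (Spec_calculate_winner_score deck1 deck2 out) := by unfold Spec_calculate_winner_score; infer_instance

-- ===== CLAIM (what is proved, stated in full; the proofs are below) =====
def Claim_equal_calculate_winner_score : Prop := ∀ (deck1 : List Int) (deck2 : List Int), Dom_calculate_winner_score deck1 deck2 → Spec_calculate_winner_score deck1 deck2 (calculate_winner_score deck1 deck2)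

-- ===== LEMMAS AND PROOFS =====

-- descending weighted sum: head of a list of length m gets weight m
def wsum : List Int → Int
  | [] => 0
  | a :: t => a * ((t.length : Int) + 1) + wsum t

theorem enumFold_eq_wsum (n : Int) (w : List Int) :
    ∀ (s acc : Int),
    (PySem.List.enumerate w s).foldl (fun acc p => acc + p.2 * (n - p.1)) acc
      = acc + wsum w + ((n - s) - (w.length : Int)) * w.sum := by
  induction w with
  | nil => intro s acc; simp [PySem.List.enumerate_nil, wsum]
  | cons a t ih =>
    intro s acc
    simp only [PySem.List.enumerate_cons, List.foldl_cons, ih, wsum, List.length_cons,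
      List.sum_cons]
    push_cast
    ring

theorem bfold_eq_wsum (w : List Int) :
    ∀ (r c : Int),
    (w.foldl (fun (p : Int × Int) card => (p.1 + card, p.2 + (p.1 + card))) (r, c)).2
      = c + (w.length : Int) * r + wsum w := by
  induction w with
  | nil => intro r c; simp [wsum]
  | cons a t ih =>
    intro r c
    simp only [List.foldl_cons, ih, wsum, List.length_cons]
    push_cast
    ring

-- ===== VERDICT (by name: the statement is the Claim_ definition above) =====
theorem calculate_winner_score_spec : Claim_equal_calculate_winner_score := by
  intro deck1 deck2 _
  unfold Spec_calculate_winner_score calculate_winner_score calculate_winner_score_alt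
  set w := if deck1.length > deck2.length then deck1 else deck2 with hw
  simp only []
  rw [bfold_eq_wsum]
  have h1 : (PySem.List.pyRange 0 ((w.length : Int)) 1).foldl
      (fun sum_cards ind => sum_cards + PySem.List.pyGetD w ind 0 * ((w.length : Int) - ind)) 0
    = (PySem.List.enumerate w 0).foldl (fun acc p => acc + p.2 * ((w.length : Int) - p.1)) 0 := by
    rw [PySem.List.enumerate_eq_map_pyRange (d := 0), List.foldl_map]
    simp
  rw [h1, enumFold_eq_wsum]
  ring
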